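-- pv_equiv track=rewrite | github.com/LeoPgn/FIAP | 1_SEMESTRE/PYTHON/2023/Aula 7 - Matrizes e Funções/Exercicios/exercicio1.py | exibe_parImpares
-- ===== SOURCE A (Python) =====
-- def exibe_parImpares (matriz, nlin, ncol):
--     pares = 0
--     impares = 0
--     for lin in range(0, nlin):
--         for col in range(0, ncol):
--             if (matriz[lin][col] % 2 == 0):
--                 pares += 1
--             else:
--                 impares += 1
--     return (pares,impares)
-- ===== SOURCE B (Python) =====
-- def _odds(rows, ncol):
--     # divide-and-conquer count of odd entries in the first ncol cells of each row
--     if not rows: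
--         return 0
--     if len(rows) == 1:
--         return sum(x % 2 for x in rows[0][:ncol])
--     mid = len(rows) // 2
--     return _odds(rows[:mid], ncol) + _odds(rows[mid:], ncol)
--
-- def exibe_parImpares(matriz, nlin, ncol):
--     if nlin <= 0 or ncol <= 0:
--         return (0, 0)
--     impares = _odds(matriz[:nlin], ncol)
--     return (nlin * ncol - impares, impares)
-- ===== Notes on version B (the rewrite author's own statement) =====
-- stated objective: alternative
-- what changed: B replaces A's indexed nested for-loops with two parallel counters by a divide-and-conquer recursion over the row list that counts only odd entries (summing x % 2), deriving the even count arithmetically as nlin*ncol - impares; Pre_ excludes exactly the inputs on which A raises IndexError.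
import Mathlib
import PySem

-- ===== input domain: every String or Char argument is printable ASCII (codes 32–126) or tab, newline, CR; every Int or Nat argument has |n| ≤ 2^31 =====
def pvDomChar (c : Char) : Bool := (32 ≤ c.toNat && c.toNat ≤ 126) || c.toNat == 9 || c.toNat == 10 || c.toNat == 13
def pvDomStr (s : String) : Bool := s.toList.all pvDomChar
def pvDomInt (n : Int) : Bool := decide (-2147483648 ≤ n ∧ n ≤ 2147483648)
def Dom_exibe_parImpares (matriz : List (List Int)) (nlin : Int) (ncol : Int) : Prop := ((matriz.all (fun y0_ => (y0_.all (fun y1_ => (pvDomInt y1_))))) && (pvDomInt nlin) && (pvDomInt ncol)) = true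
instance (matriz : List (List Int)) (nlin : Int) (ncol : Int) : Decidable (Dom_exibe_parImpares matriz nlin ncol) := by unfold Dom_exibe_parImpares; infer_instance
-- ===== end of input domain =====

-- B counts odd entries by a divide-and-conquer recursion over the row list and derives
-- the even count arithmetically as nlin*ncol - impares (alternative algorithm, same cost).

-- ===== PORT A =====
def exibe_parImpares (matriz : List (List Int)) (nlin : Int) (ncol : Int) : Int × Int :=
  -- pares = 0; impares = 0; nested 'for lin in range(0, nlin): for col in range(0, ncol)'
  -- matriz[lin][col] is in range on every admitted input (Pre_); pyGetD is exact there
  (PySem.List.pyRange 0 nlin 1).foldl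
    (fun (p : Int × Int) lin =>
      (PySem.List.pyRange 0 ncol 1).foldl
        (fun (q : Int × Int) col =>
          if PySem.Int.mod (PySem.List.pyGetD (PySem.List.pyGetD matriz lin []) col 0) 2 = 0
          then (q.1 + 1, q.2)
          else (q.1, q.2 + 1)) p) (0, 0)

-- ===== PORT B =====
-- two termination facts for the divide-and-conquer recursion in _odds (cited by decreasing_by)
theorem pvOdds_dec_take (rows : List (List Int)) (h0 : ¬ rows = []) (h1 : ¬ rows.length = 1) :
    (PySem.List.slice rows none (some (PySem.Int.floordiv (rows.length : Int) 2))).length < rows.length := by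
  have hm : PySem.Int.floordiv ((rows.length : Nat) : Int) 2 = ((rows.length / 2 : Nat) : Int) := by
    exact_mod_cast PySem.Int.floordiv_natCast rows.length 2
  have hpos : 0 < rows.length := List.length_pos_iff.mpr h0
  rw [hm, PySem.List.slice_to_natCast]
  simp only [List.length_take]
  omega

theorem pvOdds_dec_drop (rows : List (List Int)) (h0 : ¬ rows = []) (h1 : ¬ rows.length = 1) :
    (PySem.List.slice rows (some (PySem.Int.floordiv (rows.length : Int) 2)) none).length < rows.length := by
  have hm : PySem.Int.floordiv ((rows.length : Nat) : Int) 2 = ((rows.length / 2 : Nat) : Int) := by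
    exact_mod_cast PySem.Int.floordiv_natCast rows.length 2
  have hpos : 0 < rows.length := List.length_pos_iff.mpr h0
  rw [hm, PySem.List.slice_from_natCast]
  simp only [List.length_drop]
  omega

-- _odds: divide-and-conquer count of odd entries in the first ncol cells of each row
def pvOdds (rows : List (List Int)) (ncol : Int) : Int :=
  if h0 : rows = [] then 0
  else if h1 : rows.length = 1 then
    ((PySem.List.slice (rows.headD []) none (some ncol)).map (fun x => PySem.Int.mod x 2)).sum
  else
    pvOdds (PySem.List.slice rows none (some (PySem.Int.floordiv (rows.length : Int) 2))) ncol +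
    pvOdds (PySem.List.slice rows (some (PySem.Int.floordiv (rows.length : Int) 2)) none) ncol
termination_by rows.length
decreasing_by
  · exact pvOdds_dec_take rows h0 h1
  · exact pvOdds_dec_drop rows h0 h1

def exibe_parImpares_alt (matriz : List (List Int)) (nlin : Int) (ncol : Int) : Int × Int :=
  if nlin ≤ 0 ∨ ncol ≤ 0 then (0, 0)
  else
    let impares := pvOdds (PySem.List.slice matriz none (some nlin)) ncol
    (nlin * ncol - impares, impares)

-- ===== PRECONDITION & SPEC =====
-- Pre_ excludes exactly the inputs on which A raises IndexError: with both counts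
-- positive, A indexes matriz[lin] for lin < nlin and row[col] for col < ncol.
def Pre_exibe_parImpares (matriz : List (List Int)) (nlin : Int) (ncol : Int) : Prop :=
  0 < nlin ∧ 0 < ncol →
    nlin ≤ (matriz.length : Int) ∧
    ∀ row ∈ matriz.take nlin.toNat, ncol ≤ (row.length : Int)
instance (matriz : List (List Int)) (nlin : Int) (ncol : Int) : Decidable (Pre_exibe_parImpares matriz nlin ncol) := by unfold Pre_exibe_parImpares; infer_instance

def pvWitness_exibe_parImpares : List (List Int) × Int × Int := ([[1, 2], [3, 4]], 2, 2)

def Spec_exibe_parImpares (matriz : List (List Int)) (nlin : Int) (ncol : Int) (out : Int × Int) : Prop := out = exibe_parImpares_alt matriz nlin ncol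
instance (matriz : List (List Int)) (nlin : Int) (ncol : Int) (out : Int × Int) : Decidable (Spec_exibe_parImpares matriz nlin ncol out) := by unfold Spec_exibe_parImpares; infer_instance

-- ===== CLAIM (what is proved, stated in full; the proofs are below) =====
def Claim_equal_exibe_parImpares : Prop := ∀ (matriz : List (List Int)) (nlin : Int) (ncol : Int), Dom_exibe_parImpares matriz nlin ncol → Pre_exibe_parImpares matriz nlin ncol → Spec_exibe_parImpares matriz nlin ncol (exibe_parImpares matriz nlin ncol)

-- ===== LEMMAS AND PROOFS =====

-- an index loop 'for i in range(n): … xs[i] …' with n ≤ len xs is a fold over xs.take n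
theorem pv_fold_range_take {α β : Type} (m : List α) (d : α) (f : β → α → β) :
    ∀ (n : Nat) (p : β), n ≤ m.length →
      (PySem.List.pyRange 0 (n : Int) 1).foldl (fun p i => f p (PySem.List.pyGetD m i d)) p
        = (m.take n).foldl f p := by
  intro n
  induction n with
  | zero => intro p _; simp [PySem.List.pyRange_one_eq_nil]
  | succ k ih =>
    intro p hk
    have hk' : k < m.length := by omega
    rw [show ((k + 1 : Nat) : Int) = (k : Int) + 1 by push_cast; ring,
        PySem.List.pyRange_one_succ_right (by positivity),
        List.foldl_append, ih p (by omega)]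
    have htake : m.take (k + 1) = m.take k ++ [m[k]] := by
      rw [List.take_add_one]; simp [List.getElem?_eq_getElem hk']
    rw [htake, List.foldl_append]
    simp [PySem.List.pyGetD_natCast, List.getD, List.getElem?_eq_getElem hk']

-- A's fold of inner folds over rows is a fold over the flattened cells
theorem pv_fold_fold_flatMap {α β : Type} (f : β → α → β) :
    ∀ (rows : List (List α)) (p : β),
      rows.foldl (fun p row => row.foldl f p) p = (rows.flatMap id).foldl f p := by
  intro rows
  induction rows with
  | nil => intro p; simp
  | cons r rs ih => intro p; simp [List.flatMap_cons, List.foldl_append, ih]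

-- A's two-counter fold over a cell list, in closed form
theorem pv_count_fold :
    ∀ (l : List Int) (p : Int × Int),
      l.foldl (fun (q : Int × Int) x =>
          if PySem.Int.mod x 2 = 0 then (q.1 + 1, q.2) else (q.1, q.2 + 1)) p
        = (p.1 + ((l.countP (fun x => PySem.Int.mod x 2 == 0) : Nat) : Int),
           p.2 + (((l.length - l.countP (fun x => PySem.Int.mod x 2 == 0) : Nat) : Nat) : Int)) := by
  intro l
  induction l with
  | nil => intro p; simp
  | cons x xs ih =>
    intro p
    have hle : xs.countP (fun x => PySem.Int.mod x 2 == 0) ≤ xs.length := List.countP_le_length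
    have hm : PySem.Int.mod x 2 = x % 2 := PySem.Int.mod_eq_emod_of_pos (by norm_num)
    by_cases hx : PySem.Int.mod x 2 = 0
    · have hb : ((fun x => PySem.Int.mod x 2 == 0) x) = true := by
        rw [hm] at hx; simp; omega
      simp only [List.foldl_cons, if_pos hx, ih, List.countP_cons, hb, if_true, List.length_cons]
      refine Prod.ext ?_ ?_ <;> dsimp only <;> omega
    · have hb : ((fun x => PySem.Int.mod x 2 == 0) x) = false := by
        rw [hm] at hx; simp; omega
      simp only [List.foldl_cons, if_neg hx, ih, List.countP_cons, hb, Bool.false_eq_true,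
                 if_false, Nat.add_zero, List.length_cons]
      refine Prod.ext ?_ ?_ <;> dsimp only <;> omega

theorem pv_flat_length (nc : Nat) :
    ∀ (rows : List (List Int)), (∀ r ∈ rows, nc ≤ r.length) →
      ((rows.flatMap (fun r => r.take nc)).length) = rows.length * nc := by
  intro rows
  induction rows with
  | nil => intro _; simp
  | cons r rs ih =>
    intro h
    simp only [List.flatMap_cons, List.length_append, List.length_take, List.length_cons]
    rw [ih (fun a ha => h a (List.mem_cons_of_mem _ ha))]
    have h1 := h r (List.mem_cons_self)
    have h2 : min nc r.length = nc := by omega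
    rw [h2]; ring

-- B's divide-and-conquer count equals the sum of x % 2 over the flattened sliced cells
theorem pvOdds_flat (ncol : Int) (rows : List (List Int)) :
    pvOdds rows ncol
      = ((rows.flatMap (fun r => PySem.List.slice r none (some ncol))).map
          (fun x => PySem.Int.mod x 2)).sum := by
  rw [pvOdds]
  by_cases h0 : rows = []
  · subst h0; simp
  · rw [dif_neg h0]
    by_cases h1 : rows.length = 1
    · rw [dif_pos h1]
      obtain ⟨r, hr⟩ := List.length_eq_one_iff.mp h1
      subst hr; simp
    · rw [dif_neg h1]
      have hm : PySem.Int.floordiv ((rows.length : Nat) : Int) 2 = ((rows.length / 2 : Nat) : Int) := by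
        exact_mod_cast PySem.Int.floordiv_natCast rows.length 2
      rw [pvOdds_flat ncol (PySem.List.slice rows none (some (PySem.Int.floordiv (rows.length : Int) 2))),
          pvOdds_flat ncol (PySem.List.slice rows (some (PySem.Int.floordiv (rows.length : Int) 2)) none),
          hm, PySem.List.slice_to_natCast, PySem.List.slice_from_natCast]
      rw [← List.sum_append, ← List.map_append, ← List.flatMap_append, List.take_append_drop]
termination_by rows.length
decreasing_by
  · exact pvOdds_dec_take rows h0 h1
  · exact pvOdds_dec_drop rows h0 h1

-- sum of x % 2 over a list = number of odd entries = length - number of even entries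
theorem pv_sum_mod (l : List Int) :
    (l.map (fun x => PySem.Int.mod x 2)).sum
      = ((l.length - l.countP (fun x => PySem.Int.mod x 2 == 0) : Nat) : Int) := by
  have hpm : ∀ y : Int, PySem.Int.mod y 2 = y % 2 :=
    fun y => PySem.Int.mod_eq_emod_of_pos (by norm_num)
  simp only [hpm]
  induction l with
  | nil => simp
  | cons x xs ih =>
    have hle : xs.countP (fun x => x % 2 == 0) ≤ xs.length := List.countP_le_length
    have h0 : 0 ≤ x % 2 := Int.emod_nonneg x (by norm_num)
    have h2 : x % 2 < 2 := Int.emod_lt_of_pos x (by norm_num)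
    by_cases hx : x % 2 = 0
    · simp only [List.map_cons, List.sum_cons, List.countP_cons, List.length_cons, ih, hx]
      norm_num
      omega
    · have hx1 : x % 2 = 1 := by omega
      simp only [List.map_cons, List.sum_cons, List.countP_cons, List.length_cons, ih, hx1]
      norm_num
      omega

-- ===== VERDICT (by name: the statement is the Claim_ definition above) =====
theorem exibe_parImpares_spec : Claim_equal_exibe_parImpares := by
  intro matriz nlin ncol _hd hpre
  unfold Spec_exibe_parImpares
  by_cases hl : 0 < nlin
  · by_cases hc : 0 < ncol
    · -- main case
      obtain ⟨hlen, hrow⟩ := hpre ⟨hl, hc⟩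
      set nl : Nat := nlin.toNat with hnl
      set nc : Nat := ncol.toNat with hnc
      have hnl' : (nl : Int) = nlin := Int.toNat_of_nonneg (le_of_lt hl)
      have hnc' : (nc : Int) = ncol := Int.toNat_of_nonneg (le_of_lt hc)
      have hrow' : ∀ row ∈ matriz.take nl, nc ≤ row.length := by
        intro row hr
        have := hrow row hr
        omega
      -- B's value in closed form: one odd-count S, evens derived as nlin*ncol - S
      have hsl1 : PySem.List.slice matriz none (some nlin) = matriz.take nl := by
        rw [← hnl', PySem.List.slice_to_natCast]
      have hsl2 : (matriz.take nl).flatMap (fun r => PySem.List.slice r none (some ncol))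
          = (matriz.take nl).flatMap (fun r => r.take nc) :=
        List.flatMap_congr (fun r _ => by rw [← hnc', PySem.List.slice_to_natCast])
      have hBval : exibe_parImpares_alt matriz nlin ncol
          = (nlin * ncol
              - (((matriz.take nl).flatMap (fun r => r.take nc)).map
                  (fun x => PySem.Int.mod x 2)).sum,
             (((matriz.take nl).flatMap (fun r => r.take nc)).map
                 (fun x => PySem.Int.mod x 2)).sum) := by
        unfold exibe_parImpares_alt
        rw [if_neg (by omega), hsl1, pvOdds_flat, hsl2]
      rw [hBval, pv_sum_mod]
      -- A's loops = the two-counter fold over the same flattened cells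
      unfold exibe_parImpares
      rw [← hnl', ← hnc']
      rw [pv_fold_range_take matriz ([] : List Int)
            (fun (p : Int × Int) row =>
              (PySem.List.pyRange 0 ((nc : Nat) : Int) 1).foldl
                (fun (q : Int × Int) col =>
                  if PySem.Int.mod (PySem.List.pyGetD row col 0) 2 = 0
                  then (q.1 + 1, q.2) else (q.1, q.2 + 1)) p)
            nl (0, 0) (by omega)]
      have hcongr := PySem.List.foldl_congr_mem (matriz.take nl)
            (fun (p : Int × Int) row =>
              (PySem.List.pyRange 0 ((nc : Nat) : Int) 1).foldl
                (fun (q : Int × Int) col =>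
                  if PySem.Int.mod (PySem.List.pyGetD row col 0) 2 = 0
                  then (q.1 + 1, q.2) else (q.1, q.2 + 1)) p)
            (fun (p : Int × Int) row =>
              (row.take nc).foldl
                (fun (q : Int × Int) x =>
                  if PySem.Int.mod x 2 = 0 then (q.1 + 1, q.2) else (q.1, q.2 + 1)) p)
            (0, 0)
            (by
              intro acc row hrm
              exact pv_fold_range_take row 0
                (fun (q : Int × Int) x =>
                  if PySem.Int.mod x 2 = 0 then (q.1 + 1, q.2) else (q.1, q.2 + 1)) nc acc
                (hrow' row hrm))
      rw [hcongr]
      have hmapfold :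
          (matriz.take nl).foldl
            (fun (p : Int × Int) row =>
              (row.take nc).foldl
                (fun (q : Int × Int) x =>
                  if PySem.Int.mod x 2 = 0 then (q.1 + 1, q.2) else (q.1, q.2 + 1)) p) (0, 0)
          = ((matriz.take nl).map (fun row => row.take nc)).foldl
            (fun (p : Int × Int) row =>
              row.foldl
                (fun (q : Int × Int) x =>
                  if PySem.Int.mod x 2 = 0 then (q.1 + 1, q.2) else (q.1, q.2 + 1)) p) (0, 0) := by
        rw [List.foldl_map]
      rw [hmapfold, pv_fold_fold_flatMap, pv_count_fold]
      have hflat : ((matriz.take nl).map (fun row => row.take nc)).flatMap id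
          = (matriz.take nl).flatMap (fun row => row.take nc) := by
        simp [List.flatMap_def]
      rw [hflat]
      set L := (matriz.take nl).flatMap (fun row => row.take nc) with hL
      have hlenL : L.length = nl * nc := by
        rw [hL, pv_flat_length nc (matriz.take nl) hrow']
        have hln : (matriz.take nl).length = nl := by
          simp [List.length_take]; omega
        rw [hln]
      have hcle : L.countP (fun x => PySem.Int.mod x 2 == 0) ≤ L.length := List.countP_le_length
      have hprod : ((nl : Nat) : Int) * ((nc : Nat) : Int) = ((L.length : Nat) : Int) := by
        rw [hlenL]; push_cast; ring
      refine Prod.ext ?_ ?_ <;> dsimp only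
      · rw [hprod]; omega
      · omega
    · -- ncol ≤ 0 : A's inner loop runs zero times; B's empty-region early return fires
      have hr0 : PySem.List.pyRange 0 ncol 1 = [] := PySem.List.pyRange_one_eq_nil (by omega)
      unfold exibe_parImpares exibe_parImpares_alt
      rw [if_pos (by omega)]
      simp [hr0]
  · -- nlin ≤ 0 : A's outer loop runs zero times; B's empty-region early return fires
    have hr0 : PySem.List.pyRange 0 nlin 1 = [] := PySem.List.pyRange_one_eq_nil (by omega)
    unfold exibe_parImpares exibe_parImpares_alt
    rw [if_pos (by omega)]
    simp [hr0]
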